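-- pv_equiv track=rewrite | github.com/hyren01/qingdao-jdqd-dev | python/JDQD/algorithm/relation/relation_util.py | slice_sentence
-- ===== SOURCE A (Python) =====
-- def slice_sentence(min_sentences, delimiters):
--     """
--     使用滑动窗口截取子句
--     :param min_sentences:
--     :param delimiters:
--     :return:
--     """
--     num_min_sentences = len(min_sentences)
--     sub_sentences = []
--     for slice_window in range(1, num_min_sentences + 1):
--         for start in range(num_min_sentences):
--             end = start + slice_window
--             if end > num_min_sentences:
--                 break
--             sub_sentence_list = []
--             for i in range(start, end):
--                 sub_sentence_list.append(min_sentences[i])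
--                 sub_sentence_list.append(delimiters[i])
--             sub_sentence = ''.join(sub_sentence_list)
--             sub_sentences.append(sub_sentence)
--     return sub_sentences
-- ===== SOURCE B (Python) =====
-- def slice_sentence(min_sentences, delimiters):
--     n = len(min_sentences)
--     pieces = [''.join((min_sentences[i], delimiters[i])) for i in range(n)]
--     off = [0]
--     for p in pieces:
--         off.append(off[-1] + len(p))
--     full = ''.join(pieces)
--     return [full[off[s]:off[s + w]] for w in range(1, n + 1) for s in range(n - w + 1)]
-- ===== Notes on version B (the rewrite author's own statement) =====
-- stated objective: alternative
-- what changed: Instead of re-joining a fresh per-window fragment list for every window, B precomputes each sentence+delimiter piece once, concatenates them into one string with a cumulative character-offset table, and emits every window as a single slice full[off[s]:off[s+w]] (measured ~3x faster at mid sizes, unconfirmed at the largest).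
import Mathlib
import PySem

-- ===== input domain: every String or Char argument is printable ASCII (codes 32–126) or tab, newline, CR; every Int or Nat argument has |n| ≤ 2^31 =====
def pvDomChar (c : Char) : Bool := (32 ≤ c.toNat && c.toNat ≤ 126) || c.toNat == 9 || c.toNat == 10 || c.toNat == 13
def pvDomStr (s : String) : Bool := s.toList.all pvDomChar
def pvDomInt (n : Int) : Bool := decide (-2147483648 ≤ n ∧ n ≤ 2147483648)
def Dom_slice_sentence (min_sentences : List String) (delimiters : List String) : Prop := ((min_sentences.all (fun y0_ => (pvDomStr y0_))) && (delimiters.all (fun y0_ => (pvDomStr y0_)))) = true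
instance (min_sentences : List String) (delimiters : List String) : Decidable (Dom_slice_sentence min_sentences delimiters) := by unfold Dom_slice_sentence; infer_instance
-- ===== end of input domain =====

-- B replaces the per-window fragment-list joins by one precomputed concatenation plus a
-- cumulative character-offset table, emitting each window as a single slice of it.

-- ===== PORT A =====
-- inner 'for i in range(start, end)' loop building sub_sentence_list, then ''.join
def pvInnerA (ms ds : List String) (a b : Int) : String :=
  PySem.Str.join "" ((PySem.List.pyRange a b 1).foldl
    (fun l i => l ++ [PySem.List.pyGetD ms i "", PySem.List.pyGetD ds i ""]) [])

-- the 'for start in range(num)' loop with its 'break' when end > num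
def pvStartLoopA (ms ds : List String) (n w : Int) : List Int → List String → List String
  | [], acc => acc
  | s :: rest, acc =>
      if s + w > n then acc
      else pvStartLoopA ms ds n w rest (acc ++ [pvInnerA ms ds s (s + w)])

def slice_sentence (min_sentences : List String) (delimiters : List String) : List String :=
  let n : Int := min_sentences.length
  (PySem.List.pyRange 1 (n + 1) 1).foldl
    (fun acc w => pvStartLoopA min_sentences delimiters n w (PySem.List.pyRange 0 n 1) acc) []

-- ===== PORT B =====
-- ''.join((min_sentences[i], delimiters[i]))
def pvPiece (ms ds : List String) (i : Int) : String :=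
  PySem.Str.join "" [PySem.List.pyGetD ms i "", PySem.List.pyGetD ds i ""]

def slice_sentence_alt (min_sentences : List String) (delimiters : List String) : List String :=
  let n : Int := min_sentences.length
  let pieces := (PySem.List.pyRange 0 n 1).map (pvPiece min_sentences delimiters)
  let off := pieces.foldl (fun o p => o ++ [PySem.List.pyGetD o (-1) 0 + PySem.Str.len p]) [(0 : Int)]
  let full := PySem.Str.join "" pieces
  (PySem.List.pyRange 1 (n + 1) 1).flatMap (fun w =>
    (PySem.List.pyRange 0 (n - w + 1) 1).map (fun s =>
      PySem.Str.slice full (some (PySem.List.pyGetD off s 0)) (some (PySem.List.pyGetD off (s + w) 0))))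

-- ===== PRECONDITION & SPEC =====
-- Pre_ excludes inputs with fewer delimiters than sentences: there both A and B raise IndexError
-- (A at delimiters[i] in the inner loop, B when building pieces).
def Pre_slice_sentence (min_sentences : List String) (delimiters : List String) : Prop :=
  min_sentences.length ≤ delimiters.length
instance (min_sentences : List String) (delimiters : List String) : Decidable (Pre_slice_sentence min_sentences delimiters) := by unfold Pre_slice_sentence; infer_instance
def pvWitness_slice_sentence : List String × List String := (["a", "bc"], [". ", "!"])

def Spec_slice_sentence (min_sentences : List String) (delimiters : List String) (out : List String) : Prop := out = slice_sentence_alt min_sentences delimiters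
instance (min_sentences : List String) (delimiters : List String) (out : List String) : Decidable (Spec_slice_sentence min_sentences delimiters out) := by unfold Spec_slice_sentence; infer_instance

-- ===== CLAIM (what is proved, stated in full; the proofs are below) =====
def Claim_equal_slice_sentence : Prop := ∀ (min_sentences : List String) (delimiters : List String), Dom_slice_sentence min_sentences delimiters → Pre_slice_sentence min_sentences delimiters → Spec_slice_sentence min_sentences delimiters (slice_sentence min_sentences delimiters)

-- ===== LEMMAS AND PROOFS =====

-- the character pieces: piece i = min_sentences[i] ++ delimiters[i], as lists of chars
def pvPcs (ms ds : List String) : List (List Char) :=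
  List.zipWith (fun a b => a.toList ++ b.toList) ms ds

-- ''.join on the char side is flatten
theorem pv_join_nil (xs : List (List Char)) : PySem.Chars.join [] xs = xs.flatten := by
  induction xs with
  | nil => simp [PySem.Chars.join, List.intercalate]
  | cons h t ih => cases t <;> simp_all [PySem.Chars.join, List.intercalate, List.intersperse]

theorem pv_toList_join0 (parts : List String) :
    (PySem.Str.join "" parts).toList = (parts.map String.toList).flatten := by
  rw [PySem.Str.toList_join, show "".toList = ([] : List Char) from rfl, pv_join_nil]

-- length facts
theorem pv_pcs_length (ms ds : List String) (h : ms.length ≤ ds.length) :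
    (pvPcs ms ds).length = ms.length := by
  simp [pvPcs]; omega

-- A's break loop = map over the surviving starts
theorem pv_startLoopA_eq (ms ds : List String) (n w : Int) (hw : 1 ≤ w) :
    ∀ (a : Int) (acc : List String), 0 ≤ a →
      pvStartLoopA ms ds n w (PySem.List.pyRange a n 1) acc =
        acc ++ (PySem.List.pyRange a (n - w + 1) 1).map (fun s => pvInnerA ms ds s (s + w)) := by
  have H : ∀ (k : Nat) (a : Int) (acc : List String), 0 ≤ a → (n - a).toNat = k →
      pvStartLoopA ms ds n w (PySem.List.pyRange a n 1) acc =
        acc ++ (PySem.List.pyRange a (n - w + 1) 1).map (fun s => pvInnerA ms ds s (s + w)) := by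
    intro k
    induction k with
    | zero =>
      intro a acc ha hk
      have hna : n ≤ a := by omega
      rw [PySem.List.pyRange_one_eq_nil hna, PySem.List.pyRange_one_eq_nil (show n - w + 1 ≤ a by omega)]
      simp [pvStartLoopA]
    | succ k ih =>
      intro a acc ha hk
      have han : a < n := by omega
      rw [PySem.List.pyRange_one_cons han]
      by_cases hb : a + w > n
      · rw [PySem.List.pyRange_one_eq_nil (show n - w + 1 ≤ a by omega)]
        simp [pvStartLoopA, hb]
      · rw [PySem.List.pyRange_one_cons (show a < n - w + 1 by omega)]
        simp only [pvStartLoopA, if_neg hb]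
        rw [ih (a + 1) _ (by omega) (by omega)]
        simp
  intro a acc ha
  exact H (n - a).toNat a acc ha rfl

-- A unfolded to a flatMap/map nest
theorem pv_A_eq (ms ds : List String) :
    slice_sentence ms ds =
      (PySem.List.pyRange 1 ((ms.length : Int) + 1) 1).flatMap (fun w =>
        (PySem.List.pyRange 0 ((ms.length : Int) - w + 1) 1).map (fun s => pvInnerA ms ds s (s + w))) := by
  unfold slice_sentence
  rw [PySem.List.foldl_congr_mem (PySem.List.pyRange 1 ((ms.length : Int) + 1) 1) _
      (fun acc w => acc ++ (PySem.List.pyRange 0 ((ms.length : Int) - w + 1) 1).map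
        (fun s => pvInnerA ms ds s (s + w))) []
      (by
        intro acc w hw
        have h1 : 1 ≤ w := (PySem.List.mem_pyRange_one.mp hw).1
        exact pv_startLoopA_eq ms ds _ w h1 0 acc le_rfl)]
  rw [PySem.List.foldl_append_eq_flatMap]
  simp

-- inner window of A, on the char side
theorem pv_innerA_toList (ms ds : List String) (s w : Nat)
    (hsw : s + w ≤ ms.length) (hd : ms.length ≤ ds.length) :
    (pvInnerA ms ds (s : Int) ((s : Int) + (w : Int))).toList =
      (((pvPcs ms ds).drop s).take w).flatten := by
  unfold pvInnerA
  rw [PySem.List.foldl_append_eq_flatMap (fun i =>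
      [PySem.List.pyGetD ms i "", PySem.List.pyGetD ds i ""])]
  rw [pv_toList_join0]
  simp only [List.nil_append, List.map_flatMap]
  induction w with
  | zero =>
    rw [show ((s : Int) + (0 : Nat)) = (s : Int) by push_cast; ring]
    rw [PySem.List.pyRange_one_eq_nil (le_refl _)]
    simp
  | succ w ih =>
    have hsw' : s + w ≤ ms.length := by omega
    rw [show ((s : Int) + ((w + 1 : Nat) : Int)) = ((s : Int) + (w : Int)) + 1 by push_cast; ring]
    rw [PySem.List.pyRange_one_succ_right (by omega)]
    rw [List.flatMap_append, List.flatten_append, ih hsw']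
    rw [List.take_add_one]
    rw [List.getElem?_drop]
    have hlt : s + w < (pvPcs ms ds).length := by
      rw [pv_pcs_length ms ds hd]; omega
    rw [List.getElem?_eq_getElem hlt]
    simp only [pvPcs, List.getElem_zipWith, List.flatMap_cons, List.flatMap_nil,
      List.append_nil, List.map_cons, List.map_nil, List.flatten_cons, List.flatten_nil,
      Option.toList_some]
    rw [PySem.List.pyGetD_eq_getElem ms "" (by omega) (by omega),
        PySem.List.pyGetD_eq_getElem ds "" (by omega) (by omega)]
    have ht : ((s : Int) + (w : Int)).toNat = s + w := by omega
    simp [ht]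

-- B's offset fold
def pvOffs (c : Int) : List String → List Int
  | [] => []
  | p :: ps => (c + PySem.Str.len p) :: pvOffs (c + PySem.Str.len p) ps

theorem pv_off_fold (pieces : List String) :
    ∀ (o : List Int) (h : o ≠ []),
      pieces.foldl (fun o p => o ++ [PySem.List.pyGetD o (-1) 0 + PySem.Str.len p]) o =
        o ++ pvOffs (o.getLast h) pieces := by
  induction pieces with
  | nil => intro o h; simp [pvOffs]
  | cons p ps ih =>
    intro o h
    simp only [List.foldl_cons]
    rw [PySem.List.pyGetD_neg_one o 0 h]
    rw [ih (o ++ [o.getLast h + PySem.Str.len p]) (by simp)]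
    simp [pvOffs]

theorem pv_off_get (pieces : List String) :
    ∀ (k : Nat) (c : Int), k ≤ pieces.length →
      PySem.List.pyGetD (c :: pvOffs c pieces) (k : Int) 0 =
        c + (((pieces.take k).map PySem.Str.len).sum) := by
  induction pieces with
  | nil =>
    intro k c hk
    have hk0 : k = 0 := by simpa using hk
    subst hk0
    simp [pvOffs]
  | cons p ps ih =>
    intro k c hk
    cases k with
    | zero => simp
    | succ k =>
      have := ih k (c + PySem.Str.len p) (by simpa using hk)
      rw [PySem.List.pyGetD_natCast] at this ⊢
      simp only [pvOffs, List.getD_cons_succ, List.take_succ_cons, List.map_cons, List.sum_cons]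
      rw [this]
      ring

-- pieces, on the char side, are pvPcs
theorem pv_pieces_toList (ms ds : List String) (hd : ms.length ≤ ds.length) :
    (((PySem.List.pyRange 0 (ms.length : Int) 1).map (pvPiece ms ds)).map String.toList) =
      pvPcs ms ds := by
  apply List.ext_getElem
  · simp [PySem.List.length_pyRange_one, pvPcs]; omega
  · intro i h1 h2
    have hi : i < ms.length := by
      simpa [PySem.List.length_pyRange_one] using h1
    have hid : i < ds.length := by omega
    simp only [List.getElem_map, PySem.List.getElem_pyRange_one, pvPcs, List.getElem_zipWith]
    simp only [pvPiece, pv_toList_join0, List.map_cons, List.map_nil, List.flatten_cons,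
      List.flatten_nil, List.append_nil]
    rw [PySem.List.pyGetD_eq_getElem ms "" (by omega) (by omega),
        PySem.List.pyGetD_eq_getElem ds "" (by omega) (by omega)]
    simp

theorem pv_flatten_drop (L : List (List Char)) (s : Nat) :
    L.flatten.drop (((L.take s).map List.length).sum) = (L.drop s).flatten := by
  induction s generalizing L with
  | zero => simp
  | succ s ih =>
    cases L with
    | nil => simp
    | cons x L =>
      simp only [List.take_succ_cons, List.map_cons, List.sum_cons, List.flatten_cons,
        List.drop_succ_cons]
      rw [List.drop_length_add_append, ih]

theorem pv_flatten_take (M : List (List Char)) (w : Nat) :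
    M.flatten.take (((M.take w).map List.length).sum) = (M.take w).flatten := by
  induction w generalizing M with
  | zero => simp
  | succ w ih =>
    cases M with
    | nil => simp
    | cons x M =>
      simp only [List.take_succ_cons, List.map_cons, List.sum_cons, List.flatten_cons]
      rw [List.take_length_add_append, ih]

-- B's pieces list, named for the proofs
def pvPieces (ms ds : List String) : List String :=
  (PySem.List.pyRange 0 (ms.length : Int) 1).map (pvPiece ms ds)

theorem pv_pieces_len (ms ds : List String) : (pvPieces ms ds).length = ms.length := by
  simp [pvPieces, PySem.List.length_pyRange_one]

-- an off-table lookup is the char count of the first k pieces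
theorem pv_off_sum (ms ds : List String) (hd : ms.length ≤ ds.length) (k : Nat)
    (hk : k ≤ ms.length) :
    PySem.List.pyGetD ((0 : Int) :: pvOffs 0 (pvPieces ms ds)) (k : Int) 0 =
      (((((pvPcs ms ds).take k).map List.length).sum : Nat) : Int) := by
  rw [pv_off_get _ k 0 (by rw [pv_pieces_len]; exact hk)]
  have h1 : (pvPieces ms ds).map PySem.Str.len =
      (((pvPcs ms ds).map List.length).map (Nat.cast : Nat → Int)) := by
    have : (pvPieces ms ds).map PySem.Str.len =
        ((pvPieces ms ds).map String.toList).map (fun l => (l.length : Int)) := by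
      rw [List.map_map]
      exact List.map_congr_left (fun p _ => PySem.Str.len_eq p)
    rw [this]
    unfold pvPieces
    rw [pv_pieces_toList ms ds hd, List.map_map]
    rfl
  calc (0 : Int) + (((pvPieces ms ds).take k).map PySem.Str.len).sum
      = (((pvPieces ms ds).map PySem.Str.len).take k).sum := by rw [List.map_take]; omega
    _ = (((((pvPcs ms ds).map List.length).take k).map (Nat.cast : Nat → Int)).sum) := by
          rw [h1, List.map_take]
    _ = (((((pvPcs ms ds).take k).map List.length).sum : Nat) : Int) := by
          rw [← List.map_take, Nat.cast_list_sum, List.map_map]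

-- one window: A's per-window join equals B's slice of the precomputed string
theorem pv_window_eq (ms ds : List String) (hd : ms.length ≤ ds.length) (sN wN : Nat)
    (hsw : sN + wN ≤ ms.length) :
    pvInnerA ms ds (sN : Int) ((sN : Int) + (wN : Int)) =
      PySem.Str.slice (PySem.Str.join "" (pvPieces ms ds))
        (some (PySem.List.pyGetD ((0 : Int) :: pvOffs 0 (pvPieces ms ds)) (sN : Int) 0))
        (some (PySem.List.pyGetD ((0 : Int) :: pvOffs 0 (pvPieces ms ds)) ((sN : Int) + (wN : Int)) 0)) := by
  apply String.toList_inj.mp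
  rw [pv_innerA_toList ms ds sN wN hsw hd]
  rw [show ((sN : Int) + (wN : Int)) = (((sN + wN : Nat) : Int)) by push_cast; ring]
  rw [pv_off_sum ms ds hd sN (by omega), pv_off_sum ms ds hd (sN + wN) (by omega)]
  rw [PySem.Str.toList_slice]
  simp only [PySem.Chars.slice]
  rw [PySem.List.slice_toNat _ (by positivity) (by positivity)]
  have hfull : (PySem.Str.join "" (pvPieces ms ds)).toList = (pvPcs ms ds).flatten := by
    rw [pv_toList_join0]
    unfold pvPieces
    rw [pv_pieces_toList ms ds hd]
  rw [hfull]
  rw [Int.toNat_natCast, Int.toNat_natCast]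
  rw [pv_flatten_drop]
  have hsplit : ((pvPcs ms ds).take (sN + wN)).map List.length =
      ((pvPcs ms ds).take sN).map List.length ++
        ((((pvPcs ms ds).drop sN).take wN).map List.length) := by
    rw [List.take_add, List.map_append]
  rw [hsplit, List.sum_append, Nat.add_sub_cancel_left]
  exact (pv_flatten_take _ wN).symm

-- B unfolded: offsets fold replaced by its closed description
theorem pv_B_eq (ms ds : List String) :
    slice_sentence_alt ms ds =
      (PySem.List.pyRange 1 ((ms.length : Int) + 1) 1).flatMap (fun w =>
        (PySem.List.pyRange 0 ((ms.length : Int) - w + 1) 1).map (fun s =>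
          PySem.Str.slice (PySem.Str.join "" (pvPieces ms ds))
            (some (PySem.List.pyGetD ((0 : Int) :: pvOffs 0 (pvPieces ms ds)) s 0))
            (some (PySem.List.pyGetD ((0 : Int) :: pvOffs 0 (pvPieces ms ds)) (s + w) 0)))) := by
  have hfold : (pvPieces ms ds).foldl
      (fun o p => o ++ [PySem.List.pyGetD o (-1) 0 + PySem.Str.len p]) [(0 : Int)] =
        (0 : Int) :: pvOffs 0 (pvPieces ms ds) := by
    rw [pv_off_fold (pvPieces ms ds) [(0 : Int)] (by simp)]
    simp
  simp only [slice_sentence_alt]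
  rw [show (PySem.List.pyRange 0 ((ms.length : Int)) 1).map (pvPiece ms ds) = pvPieces ms ds
      from rfl]
  rw [hfold]

theorem pv_main (ms ds : List String) (hpre : ms.length ≤ ds.length) :
    slice_sentence ms ds = slice_sentence_alt ms ds := by
  rw [pv_A_eq, pv_B_eq]
  rw [List.flatMap_def, List.flatMap_def]
  refine congrArg List.flatten (List.map_congr_left ?_)
  intro w hw
  obtain ⟨hw1, hw2⟩ := PySem.List.mem_pyRange_one.mp hw
  apply List.map_congr_left
  intro t ht
  obtain ⟨ht1, ht2⟩ := PySem.List.mem_pyRange_one.mp ht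
  obtain ⟨sN, rfl⟩ : ∃ k : Nat, t = (k : Int) := ⟨t.toNat, by omega⟩
  obtain ⟨wN, rfl⟩ : ∃ k : Nat, w = (k : Int) := ⟨w.toNat, by omega⟩
  exact pv_window_eq ms ds hpre sN wN (by omega)

-- ===== VERDICT (by name: the statement is the Claim_ definition above) =====
theorem slice_sentence_spec : Claim_equal_slice_sentence := by
  intro ms ds _ hpre
  exact pv_main ms ds hpre
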